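-- pv_equiv track=rewrite | github.com/Gito44/cmpe493.1 | query_processor.py | query_punct
-- ===== SOURCE A (Python) =====
-- import string
--
-- punct= string.punctuation
--
-- def query_punct(string):
--     for lett in punct:
--         if lett == "-" or lett == "/":
--                 string = string.replace(lett, " ")
--                 string = string.lower()
--         else:
--             string = string.replace(lett, "")
--             string = string.lower()
--     return string
-- ===== SOURCE B (Python) =====
-- import string as _string
--
-- _PUNCT = set(_string.punctuation)
--
-- def query_punct(string):
--     out = []
--     for ch in string:
--         if ch == '-' or ch == '/':
--             out.append(' ')
--         elif ch in _PUNCT: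
--             pass
--         else:
--             out.append(ch)
--     return ''.join(out).lower()
-- ===== Notes on version B (the rewrite author's own statement) =====
-- stated objective: simpler
-- what changed: B makes a single pass over the input's characters (mapping '-'/'/' to a space, dropping other punctuation, keeping the rest) and lowercases once at the end, instead of A's 32 full replace-then-lower passes, one per punctuation character.
import Mathlib
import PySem

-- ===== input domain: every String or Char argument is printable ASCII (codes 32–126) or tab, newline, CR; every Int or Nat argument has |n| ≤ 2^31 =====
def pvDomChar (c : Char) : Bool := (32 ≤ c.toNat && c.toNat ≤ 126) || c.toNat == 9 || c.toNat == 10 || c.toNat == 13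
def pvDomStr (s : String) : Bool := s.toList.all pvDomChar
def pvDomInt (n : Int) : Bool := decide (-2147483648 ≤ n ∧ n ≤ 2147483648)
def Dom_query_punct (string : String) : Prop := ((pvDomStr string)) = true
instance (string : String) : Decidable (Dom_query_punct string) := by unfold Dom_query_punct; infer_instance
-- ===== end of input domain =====

-- B builds the result in ONE pass over the input's characters (per-char switch + one final
-- lowercase) instead of A's 32 full replace-then-lower passes, one per punctuation character.


-- ===== PORT A =====
-- module constant: punct = string.punctuation
def punctA : String := "!\"#$%&'()*+,-./:;<=>?@[\\]^_`{|}~"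

-- A: for each punctuation letter, replace it ('-','/' by a space, others by nothing) and lower.
def query_punct (string : String) : String :=
  punctA.toList.foldl
    (fun s lett =>
      if lett = '-' ∨ lett = '/' then
        PySem.Str.lower (PySem.Str.replace s (String.ofList [lett]) " ")
      else
        PySem.Str.lower (PySem.Str.replace s (String.ofList [lett]) ""))
    string

-- ===== PORT B =====
-- B's module constant: _PUNCT = set(string.punctuation)
def punctSetB : PySem.Set Char := PySem.Set.ofList punctA.toList

-- B: one pass over the characters, then one final lower.
def query_punct_alt (string : String) : String :=
  PySem.Str.lower (String.ofList
    (string.toList.foldl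
      (fun out ch =>
        if ch = '-' ∨ ch = '/' then out ++ [' ']
        else if punctSetB.contains ch then out
        else out ++ [ch])
      []))

-- ===== PRECONDITION & SPEC =====
def Spec_query_punct (string : String) (out : String) : Prop := out = query_punct_alt string
instance (string : String) (out : String) : Decidable (Spec_query_punct string out) := by unfold Spec_query_punct; infer_instance

-- ===== CLAIM (what is proved, stated in full; the proofs are below) =====
def Claim_equal_query_punct : Prop := ∀ (string : String), Dom_query_punct string → Spec_query_punct string (query_punct string)

-- ===== LEMMAS AND PROOFS =====

-- per-char replacement lists
def replA (lett : Char) : List Char := if lett = '-' ∨ lett = '/' then [' '] else []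

-- one A-step, viewed per input character (replace by replA, then lowercase)
def hA (lett x : Char) : List Char :=
  ((if x = lett then replA lett else [x]).map PySem.Chars.lowerChar)

def replB (ch : Char) : List Char :=
  if ch = '-' ∨ ch = '/' then [' ']
  else if punctSetB.contains ch then []
  else [ch]

-- the whole A pipeline, per input character
def HA (x : Char) : List Char :=
  punctA.toList.foldl (fun acc c => acc.flatMap (hA c)) [x]

lemma replace_go_single (c : Char) (new : List Char) :
    ∀ (fuel : Nat) (l acc : List Char), l.length ≤ fuel →
      PySem.Chars.replace.go [c] new fuel l acc
        = acc.reverse ++ l.flatMap (fun x => if x = c then new else [x]) := by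
  intro fuel
  induction fuel with
  | zero =>
    intro l acc h
    have : l = [] := List.eq_nil_of_length_eq_zero (Nat.le_zero.mp h)
    subst this; simp [PySem.Chars.replace.go]
  | succ n ih =>
    intro l acc h
    cases l with
    | nil => simp [PySem.Chars.replace.go]
    | cons x t =>
      simp only [PySem.Chars.replace.go]
      by_cases hx : x = c
      · subst hx
        have hpre : [x].isPrefixOf (x :: t) = true := by simp [List.isPrefixOf]
        rw [if_pos hpre]
        have hdrop : List.drop [x].length (x :: t) = t := by simp
        rw [hdrop]
        rw [ih t (new.reverse ++ acc) (by simpa using Nat.le_of_succ_le_succ h)]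
        simp
      · have hpre : [c].isPrefixOf (x :: t) = false := by
          simp [List.isPrefixOf]; exact fun h' => (hx h'.symm).elim
        rw [hpre]
        simp only [Bool.false_eq_true, if_false]
        rw [ih t (x :: acc) (by simpa using Nat.le_of_succ_le_succ h)]
        simp [hx]

lemma replace_single (l : List Char) (c : Char) (new : List Char) :
    PySem.Chars.replace l [c] new = l.flatMap (fun x => if x = c then new else [x]) := by
  rw [PySem.Chars.replace]
  simp only [List.isEmpty_cons, Bool.false_eq_true, if_false]
  simpa using replace_go_single c new l.length l [] le_rfl

-- one A-step on the list side is a flatMap of hA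
lemma step_eq_flatMap (l : List Char) (lett : Char) :
    PySem.Chars.lower (PySem.Chars.replace l [lett] (replA lett)) = l.flatMap (hA lett) := by
  rw [replace_single, PySem.Chars.lower, List.map_flatMap]
  rfl

-- folding flatMap-steps acts per input character
lemma foldl_flatMap (h : Char → Char → List Char) (ps : List Char) :
    ∀ (l : List Char),
      ps.foldl (fun acc c => acc.flatMap (h c)) l
        = l.flatMap (fun x => ps.foldl (fun acc c => acc.flatMap (h c)) [x]) := by
  induction ps with
  | nil => intro l; simp
  | cons p ps ih =>
    intro l
    simp only [List.foldl_cons]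
    rw [ih (l.flatMap (h p)), List.flatMap_assoc]
    refine List.flatMap_congr (fun x _ => ?_)
    have hx : ([x] : List Char).flatMap (h p) = h p x := by simp
    rw [hx, ih (h p x)]

-- pointwise agreement of the two pipelines, checked on all 128 low codepoints
set_option maxRecDepth 10000 in
set_option maxHeartbeats 2000000 in
lemma pointwise_fin :
    ∀ n : Fin 128, HA (Char.ofNat n.val) = (replB (Char.ofNat n.val)).map PySem.Chars.lowerChar := by
  decide

lemma pointwise (c : Char) (hc : pvDomChar c = true) :
    HA c = (replB c).map PySem.Chars.lowerChar := by
  have h128 : c.toNat < 128 := by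
    simp [pvDomChar] at hc; omega
  have := pointwise_fin ⟨c.toNat, h128⟩
  simpa [Char.ofNat_toNat] using this

-- one string-level A step, moved to the list side
lemma A_step_toList (s : String) (p : Char) :
    (if p = '-' ∨ p = '/' then
       PySem.Str.lower (PySem.Str.replace s (String.ofList [p]) " ")
     else
       PySem.Str.lower (PySem.Str.replace s (String.ofList [p]) "")).toList
    = PySem.Chars.lower (PySem.Chars.replace s.toList [p] (replA p)) := by
  by_cases hp : p = '-' ∨ p = '/' <;>
    simp [hp, replA, PySem.Str.toList_lower, PySem.Str.toList_replace]

-- A's string-level fold, moved to the list side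
lemma A_toList (ps : List Char) : ∀ (s : String),
    (ps.foldl (fun s lett =>
       if lett = '-' ∨ lett = '/' then
         PySem.Str.lower (PySem.Str.replace s (String.ofList [lett]) " ")
       else
         PySem.Str.lower (PySem.Str.replace s (String.ofList [lett]) ""))
      s).toList
    = ps.foldl (fun l lett => PySem.Chars.lower (PySem.Chars.replace l [lett] (replA lett))) s.toList := by
  induction ps with
  | nil => intro s; rfl
  | cons p ps ih =>
    intro s
    simp only [List.foldl_cons]
    rw [ih, A_step_toList]

-- B's accumulator step is an append of replB
lemma B_step_eq :
    (fun (out : List Char) (ch : Char) =>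
       if ch = '-' ∨ ch = '/' then out ++ [' ']
       else if punctSetB.contains ch then out
       else out ++ [ch])
    = (fun out ch => out ++ replB ch) := by
  funext out ch
  simp only [replB]
  split_ifs <;> simp

-- ===== VERDICT (by name: the statement is the Claim_ definition above) =====
theorem query_punct_spec : Claim_equal_query_punct := by
  intro s hs
  unfold Spec_query_punct query_punct query_punct_alt
  refine String.toList_inj.mp ?_
  rw [A_toList]
  have hfun : (fun (l : List Char) (lett : Char) =>
      PySem.Chars.lower (PySem.Chars.replace l [lett] (replA lett)))
      = (fun l lett => l.flatMap (hA lett)) := by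
    funext l lett; exact step_eq_flatMap l lett
  rw [hfun, foldl_flatMap]
  have hL : s.toList.flatMap HA
      = s.toList.flatMap (fun c => (replB c).map PySem.Chars.lowerChar) := by
    refine List.flatMap_congr (fun c hc => ?_)
    have : pvDomChar c = true := by
      have := hs
      unfold Dom_query_punct pvDomStr at this
      exact List.all_eq_true.mp this c hc
    exact pointwise c this
  rw [show (fun x => punctA.toList.foldl (fun acc c => acc.flatMap (hA c)) [x]) = HA from rfl]
  rw [hL]
  rw [PySem.Str.toList_lower]
  rw [String.toList_ofList, B_step_eq, PySem.List.foldl_append_eq_flatMap]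
  simp [PySem.Chars.lower, List.map_flatMap]
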